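-- pv_equiv track=rewrite | github.com/d0ngjini/hello_algorithm | 프로그래머스/2/389480. 완전범죄/완전범죄.py | solution
-- ===== SOURCE A (Python) =====
-- def solution(info, n, m):
--     # 보자마자 무슨 의도의 문제인지 알아야 함
--
--     # 모든 경우의 수 체크?
--     # 이중 포인터 같긴한데
--     # 항상 b를 먼저 진행시키고 a를 체크 -> 그리디 접근법 실패
--
--     # dp
--     dp = {}
--     dp[(0, 0, 0)] = 0
--
--     for i in range(len(info)):
--         a_trace, b_trace = info[i]
--         new_dp = {}
--
--         for (idx, a, b), a_total in dp.items():
--             if idx != i: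
--                 continue
--
--             if a + a_trace < n:
--                 new_key = (i + 1, a + a_trace, b)
--                 new_total = a + a_trace
--                 new_dp[new_key] = min(new_dp.get(new_key, float('inf')), new_total)
--
--             if b + b_trace < m:
--                 new_key = (i + 1, a, b + b_trace)
--                 new_total = a
--                 new_dp[new_key] = min(new_dp.get(new_key, float('inf')), new_total)
--
--         dp.update(new_dp)
--
--
--     answer = min((v for (i, a, b), v in dp.items() if i == len(info)), default=float('inf'))
--     return answer if answer != float('inf') else -1
-- ===== SOURCE B (Python) =====
-- def solution(info, n, m):
--     # Dominance DP: keep, for each reachable total A-trace, only the minimal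
--     # total B-trace (a lower b never hurts later), dropping the b dimension.
--     best = {0: 0}  # a_trace_sum -> minimal b_trace_sum
--     for a_t, b_t in info:
--         nxt = {}
--         for a, b in best.items():
--             if a + a_t < n:
--                 k = a + a_t
--                 if k not in nxt or b < nxt[k]:
--                     nxt[k] = b
--             if b + b_t < m:
--                 nb = b + b_t
--                 if a not in nxt or nb < nxt[a]:
--                     nxt[a] = nb
--         best = nxt
--     return min(best, default=-1)
-- ===== Notes on version B (the rewrite author's own statement) =====
-- stated objective: faster
-- what changed: Replaced the DP over full (index, a_trace, b_trace) states by a dominance-pruned DP that drops the b dimension entirely: a dict mapping each reachable a_trace sum to the minimal b_trace sum achieving it (a lower b can only enable more future b-assignments, so it dominates), shrinking the state space from O(n*m) pairs to O(n) keys per step.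
import Mathlib
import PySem

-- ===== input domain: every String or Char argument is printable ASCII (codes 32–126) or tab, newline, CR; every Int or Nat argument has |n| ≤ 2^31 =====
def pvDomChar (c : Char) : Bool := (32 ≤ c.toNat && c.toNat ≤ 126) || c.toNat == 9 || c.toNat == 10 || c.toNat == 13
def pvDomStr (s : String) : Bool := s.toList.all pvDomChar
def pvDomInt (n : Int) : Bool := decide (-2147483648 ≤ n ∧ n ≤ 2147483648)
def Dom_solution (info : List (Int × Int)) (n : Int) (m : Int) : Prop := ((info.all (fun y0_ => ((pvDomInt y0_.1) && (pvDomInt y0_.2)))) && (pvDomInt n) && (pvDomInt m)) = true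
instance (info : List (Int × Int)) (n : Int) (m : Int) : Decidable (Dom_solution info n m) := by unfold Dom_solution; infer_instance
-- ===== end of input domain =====

-- B replaces A's DP over full (index, a_trace, b_trace) states by a dominance-pruned DP that
-- drops the b dimension: a dict from each reachable a_trace sum to the minimal b_trace sum
-- achieving it (a lower b only enables more future b-assignments, so it dominates).

-- ===== PORT A =====
-- the body of A's inner loop 'for (idx, a, b), a_total in dp.items(): …' (a_total is unused by A);
-- min(new_dp.get(new_key, float('inf')), new_total): the float('inf') default is exactly the
-- absent-key case, so it is ported as a match on get? (all stored values are ints)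
def aInnerBody (n m i : Int) (a_trace b_trace : Int)
    (new_dp : PySem.Dict (Int × Int × Int) Int) (e : (Int × Int × Int) × Int) :
    PySem.Dict (Int × Int × Int) Int :=
  let idx := e.1.1
  let a := e.1.2.1
  let b := e.1.2.2
  if idx ≠ i then new_dp
  else
    let new_dp :=
      if a + a_trace < n then
        match new_dp.get? (i + 1, a + a_trace, b) with
        | none => new_dp.insert (i + 1, a + a_trace, b) (a + a_trace)
        | some old => new_dp.insert (i + 1, a + a_trace, b) (min old (a + a_trace))
      else new_dp
    if b + b_trace < m then
      match new_dp.get? (i + 1, a, b + b_trace) with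
      | none => new_dp.insert (i + 1, a, b + b_trace) a
      | some old => new_dp.insert (i + 1, a, b + b_trace) (min old a)
    else new_dp

-- the body of A's outer loop 'for i in range(len(info)): …' (indexed access info[i] = enumerate)
def aOuterBody (n m : Int) (dp : PySem.Dict (Int × Int × Int) Int) (it : Int × (Int × Int)) :
    PySem.Dict (Int × Int × Int) Int :=
  let i := it.1
  let a_trace := it.2.1
  let b_trace := it.2.2
  let new_dp := dp.items.foldl (aInnerBody n m i a_trace b_trace) PySem.Dict.empty
  dp.update new_dp.items

def solution (info : List (Int × Int)) (n : Int) (m : Int) : Int :=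
  let dp0 : PySem.Dict (Int × Int × Int) Int := (PySem.Dict.empty).insert (0, 0, 0) 0
  let dp := (PySem.List.enumerate info).foldl (aOuterBody n m) dp0
  -- min(…, default=float('inf')) then 'answer if answer != inf else -1': the inf default is hit
  -- exactly when the filtered value list is empty, i.e. the none case below, which returns -1
  match PySem.List.min? ((dp.items.filter (fun e => e.1.1 == (info.length : Int))).map (fun e => e.2)) (fun v => v) with
  | none => -1
  | some v => v

-- ===== PORT B =====
-- B's repeated idiom 'if k not in nxt or c < nxt[k]: nxt[k] = c'
def bRelax (d : PySem.Dict Int Int) (k c : Int) : PySem.Dict Int Int :=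
  match d.get? k with
  | none => d.insert k c
  | some old => if c < old then d.insert k c else d

-- the body of B's inner loop 'for a, b in best.items(): …'
def altInner (n m : Int) (tr : Int × Int) (nxt : PySem.Dict Int Int) (e : Int × Int) : PySem.Dict Int Int :=
  let nxt := if e.1 + tr.1 < n then bRelax nxt (e.1 + tr.1) e.2 else nxt
  if e.2 + tr.2 < m then bRelax nxt e.1 (e.2 + tr.2) else nxt

-- one step of B: rebuild the dict a_trace ↦ minimal b_trace from the current one
def altStep (n m : Int) (best : PySem.Dict Int Int) (tr : Int × Int) : PySem.Dict Int Int :=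
  best.items.foldl (altInner n m tr) PySem.Dict.empty

def solution_alt (info : List (Int × Int)) (n : Int) (m : Int) : Int :=
  let best := info.foldl (altStep n m) ((PySem.Dict.empty).insert 0 0)
  -- min(best, default=-1): min over the keys, -1 when the dict is empty
  match PySem.List.min? best.keys (fun v => v) with
  | none => -1
  | some v => v

-- ===== PRECONDITION & SPEC =====
def Spec_solution (info : List (Int × Int)) (n : Int) (m : Int) (out : Int) : Prop := out = solution_alt info n m
instance (info : List (Int × Int)) (n : Int) (m : Int) (out : Int) : Decidable (Spec_solution info n m out) := by unfold Spec_solution; infer_instance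

-- ===== CLAIM (what is proved, stated in full; the proofs are below) =====
def Claim_equal_solution : Prop := ∀ (info : List (Int × Int)) (n : Int) (m : Int), Dom_solution info n m → Spec_solution info n m (solution info n m)

-- ===== LEMMAS AND PROOFS =====

-- spec-side description of one step: the states one task tr produces from a single state p
def pvContrib (n m : Int) (tr : Int × Int) (p : Int × Int) : List (Int × Int) :=
  (if p.1 + tr.1 < n then [(p.1 + tr.1, p.2)] else []) ++
  (if p.2 + tr.2 < m then [(p.1, p.2 + tr.2)] else [])

def pvStep (n m : Int) (tr : Int × Int) (S : List (Int × Int)) : List (Int × Int) :=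
  S.flatMap (pvContrib n m tr)

def pvReach (n m : Int) (info : List (Int × Int)) (S : List (Int × Int)) : List (Int × Int) :=
  info.foldl (fun S tr => pvStep n m tr S) S

-- the (a, b) pairs of the dict entries with index i, in order
def pvProj (i : Int) (items : List ((Int × Int × Int) × Int)) : List (Int × Int) :=
  (items.filter (fun e => e.1.1 == i)).map (fun e => (e.1.2.1, e.1.2.2))

theorem mem_pvStep (n m : Int) (tr : Int × Int) (S : List (Int × Int)) (x : Int × Int) :
    x ∈ pvStep n m tr S ↔ ∃ p ∈ S, x ∈ pvContrib n m tr p := by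
  simp [pvStep]

theorem pvStep_congr (n m : Int) (tr : Int × Int) (S S' : List (Int × Int))
    (h : ∀ x, x ∈ S ↔ x ∈ S') (x : Int × Int) :
    x ∈ pvStep n m tr S ↔ x ∈ pvStep n m tr S' := by
  simp only [mem_pvStep]
  constructor <;> rintro ⟨p, hp, hc⟩
  · exact ⟨p, (h p).mp hp, hc⟩
  · exact ⟨p, (h p).mpr hp, hc⟩

-- min over a list of ints depends only on membership
theorem min?_congr_mem (xs ys : List Int) (h : ∀ v, v ∈ xs ↔ v ∈ ys) :
    PySem.List.min? xs (fun v => v) = PySem.List.min? ys (fun v => v) := by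
  cases hx : PySem.List.min? xs (fun v => v) with
  | none =>
    cases hy : PySem.List.min? ys (fun v => v) with
    | none => rfl
    | some b =>
      rw [PySem.List.min?_eq_none_iff] at hx
      have := (h b).mpr (PySem.List.min?_mem hy)
      simp [hx] at this
  | some a =>
    cases hy : PySem.List.min? ys (fun v => v) with
    | none =>
      rw [PySem.List.min?_eq_none_iff] at hy
      have := (h a).mp (PySem.List.min?_mem hx)
      simp [hy] at this
    | some b =>
      have h1 := PySem.List.min?_isMin hx b ((h b).mpr (PySem.List.min?_mem hy))
      have h2 := PySem.List.min?_isMin hy a ((h a).mp (PySem.List.min?_mem hx))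
      simp only [Option.some.injEq]
      exact le_antisymm h1 h2

-- ---------- B-side lemmas: the dominance invariant ----------

-- lookups through bRelax
theorem bRelax_get?_self (d : PySem.Dict Int Int) (k c : Int) :
    (bRelax d k c).get? k = some (match d.get? k with | none => c | some old => min old c) := by
  unfold bRelax
  cases hg : d.get? k with
  | none => simp [PySem.Dict.get?_insert_self]
  | some old =>
    by_cases hc : c < old
    · simp [hc, PySem.Dict.get?_insert_self, min_eq_right (le_of_lt hc)]
    · simp [hc, hg, min_eq_left (le_of_not_gt hc)]

theorem bRelax_get?_ne (d : PySem.Dict Int Int) (k c k' : Int) (h : k' ≠ k) :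
    (bRelax d k c).get? k' = d.get? k' := by
  unfold bRelax
  cases d.get? k with
  | none => exact PySem.Dict.get?_insert_of_ne d c h
  | some old =>
    by_cases hc : c < old
    · simp [hc, PySem.Dict.get?_insert_of_ne d c h]
    · simp [hc]

theorem bRelax_nodup (d : PySem.Dict Int Int) (k c : Int) (h : d.keys.Nodup) :
    (bRelax d k c).keys.Nodup := by
  unfold bRelax
  cases d.get? k with
  | none => exact PySem.Dict.nodup_keys_insert _ _ _ h
  | some old =>
    by_cases hc : c < old
    · simp only [hc, if_true]; exact PySem.Dict.nodup_keys_insert _ _ _ h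
    · simpa [hc] using h

-- relaxing never raises a stored value
theorem bRelax_mono (d : PySem.Dict Int Int) (k c k' v : Int) (h : d.get? k' = some v) :
    ∃ v', (bRelax d k c).get? k' = some v' ∧ v' ≤ v := by
  by_cases he : k' = k
  · subst he
    rw [bRelax_get?_self, h]
    exact ⟨min v c, rfl, min_le_left _ _⟩
  · exact ⟨v, by rw [bRelax_get?_ne d k c k' he, h], le_refl v⟩

-- after relaxing, the stored value is at most the candidate
theorem bRelax_le_cand (d : PySem.Dict Int Int) (k c : Int) :
    ∃ v', (bRelax d k c).get? k = some v' ∧ v' ≤ c := by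
  rw [bRelax_get?_self]
  cases d.get? k with
  | none => exact ⟨c, rfl, le_refl c⟩
  | some old => exact ⟨min old c, rfl, min_le_right _ _⟩

theorem altInner_mono (n m : Int) (tr : Int × Int) (acc : PySem.Dict Int Int) (e : Int × Int)
    (k v : Int) (h : acc.get? k = some v) :
    ∃ v', (altInner n m tr acc e).get? k = some v' ∧ v' ≤ v := by
  unfold altInner
  by_cases h1 : e.1 + tr.1 < n <;> by_cases h2 : e.2 + tr.2 < m <;> simp only [h1, h2, if_true, if_false]
  · obtain ⟨v1, hv1, hle1⟩ := bRelax_mono acc (e.1 + tr.1) e.2 k v h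
    obtain ⟨v2, hv2, hle2⟩ := bRelax_mono _ e.1 (e.2 + tr.2) k v1 hv1
    exact ⟨v2, hv2, le_trans hle2 hle1⟩
  · exact bRelax_mono acc (e.1 + tr.1) e.2 k v h
  · exact bRelax_mono acc e.1 (e.2 + tr.2) k v h
  · exact ⟨v, h, le_refl v⟩

theorem foldl_altInner_mono (n m : Int) (tr : Int × Int) (l : List (Int × Int)) :
    ∀ (acc : PySem.Dict Int Int) (k v : Int), acc.get? k = some v →
    ∃ v', (l.foldl (altInner n m tr) acc).get? k = some v' ∧ v' ≤ v := by
  induction l with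
  | nil => intro acc k v h; exact ⟨v, h, le_refl v⟩
  | cons e t ih =>
    intro acc k v h
    obtain ⟨v1, hv1, hle1⟩ := altInner_mono n m tr acc e k v h
    obtain ⟨v2, hv2, hle2⟩ := ih _ k v1 hv1
    refine ⟨v2, ?_, le_trans hle2 hle1⟩
    simp only [List.foldl_cons]
    exact hv2

-- one altInner step preserves nodup and soundness and covers e's contributions
theorem altInner_inv (n m : Int) (tr : Int × Int) (S : List (Int × Int))
    (acc : PySem.Dict Int Int) (e : Int × Int) (heS : e ∈ S)
    (hn : acc.keys.Nodup) (hs : ∀ a b, acc.get? a = some b → (a, b) ∈ pvStep n m tr S) :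
    (altInner n m tr acc e).keys.Nodup ∧
    (∀ a b, (altInner n m tr acc e).get? a = some b → (a, b) ∈ pvStep n m tr S) ∧
    (∀ x ∈ pvContrib n m tr e, ∃ v', (altInner n m tr acc e).get? x.1 = some v' ∧ v' ≤ x.2) := by
  have hca : e.1 + tr.1 < n → ((e.1 + tr.1, e.2) : Int × Int) ∈ pvStep n m tr S := by
    intro h1
    exact (mem_pvStep n m tr S _).mpr ⟨e, heS, by simp [pvContrib, h1]⟩
  have hcb : e.2 + tr.2 < m → ((e.1, e.2 + tr.2) : Int × Int) ∈ pvStep n m tr S := by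
    intro h2
    exact (mem_pvStep n m tr S _).mpr ⟨e, heS, by simp [pvContrib, h2]⟩
  -- soundness through one bRelax whose candidate is in pvStep
  have hrel : ∀ (d : PySem.Dict Int Int) (k c : Int),
      (∀ a b, d.get? a = some b → (a, b) ∈ pvStep n m tr S) → ((k, c) : Int × Int) ∈ pvStep n m tr S →
      ∀ a b, (bRelax d k c).get? a = some b → (a, b) ∈ pvStep n m tr S := by
    intro d k c hd hkc a b hab
    by_cases he : a = k
    · subst he
      rw [bRelax_get?_self] at hab
      cases hg : d.get? a with
      | none => rw [hg] at hab; simp at hab; subst hab; exact hkc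
      | some old =>
        rw [hg] at hab; simp at hab
        rcases min_cases old c with ⟨hmin, _⟩ | ⟨hmin, _⟩
        · rw [← hab, hmin]; exact hd a old hg
        · rw [← hab, hmin]; exact hkc
    · rw [bRelax_get?_ne d k c a he] at hab
      exact hd a b hab
  unfold altInner
  by_cases h1 : e.1 + tr.1 < n <;> by_cases h2 : e.2 + tr.2 < m <;>
    simp only [h1, h2, if_true, if_false]
  · have hn1 := bRelax_nodup acc (e.1 + tr.1) e.2 hn
    have hs1 := hrel acc (e.1 + tr.1) e.2 hs (hca h1)
    refine ⟨bRelax_nodup _ e.1 (e.2 + tr.2) hn1, hrel _ e.1 (e.2 + tr.2) hs1 (hcb h2), ?_⟩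
    intro x hx
    simp only [pvContrib, h1, h2, if_true, List.mem_append, List.mem_singleton] at hx
    rcases hx with hx | hx <;> subst hx
    · obtain ⟨v1, hv1, hle1⟩ := bRelax_le_cand acc (e.1 + tr.1) e.2
      obtain ⟨v2, hv2, hle2⟩ := bRelax_mono _ e.1 (e.2 + tr.2) _ v1 hv1
      exact ⟨v2, hv2, le_trans hle2 hle1⟩
    · exact bRelax_le_cand _ e.1 (e.2 + tr.2)
  · refine ⟨bRelax_nodup acc (e.1 + tr.1) e.2 hn, hrel acc (e.1 + tr.1) e.2 hs (hca h1), ?_⟩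
    intro x hx
    simp only [pvContrib, h1, h2, if_true, if_false, List.append_nil, List.mem_singleton] at hx
    subst hx
    exact bRelax_le_cand acc (e.1 + tr.1) e.2
  · refine ⟨bRelax_nodup acc e.1 (e.2 + tr.2) hn, hrel acc e.1 (e.2 + tr.2) hs (hcb h2), ?_⟩
    intro x hx
    simp only [pvContrib, h1, h2, if_true, if_false, List.nil_append, List.mem_singleton] at hx
    subst hx
    exact bRelax_le_cand acc e.1 (e.2 + tr.2)
  · refine ⟨hn, hs, ?_⟩
    intro x hx
    simp [pvContrib, h1, h2] at hx

-- B's inner loop: nodup, soundness, and coverage of every scanned item's contributions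
theorem b_inner (n m : Int) (tr : Int × Int) (S : List (Int × Int)) (items : List (Int × Int)) :
    ∀ (acc : PySem.Dict Int Int),
    (∀ e ∈ items, e ∈ S) → acc.keys.Nodup →
    (∀ a b, acc.get? a = some b → (a, b) ∈ pvStep n m tr S) →
    let acc' := items.foldl (altInner n m tr) acc
    acc'.keys.Nodup ∧ (∀ a b, acc'.get? a = some b → (a, b) ∈ pvStep n m tr S) ∧
    (∀ e ∈ items, ∀ x ∈ pvContrib n m tr e, ∃ v', acc'.get? x.1 = some v' ∧ v' ≤ x.2) := by
  induction items with
  | nil => intro acc _ hn hs; exact ⟨hn, hs, by intro e he; simp at he⟩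
  | cons e t ih =>
    intro acc hsub hn hs
    obtain ⟨hn1, hs1, hcov1⟩ := altInner_inv n m tr S acc e (hsub e (List.mem_cons_self)) hn hs
    obtain ⟨hn2, hs2, hcov2⟩ := ih (altInner n m tr acc e)
      (fun e' he' => hsub e' (List.mem_cons_of_mem e he')) hn1 hs1
    refine ⟨hn2, hs2, ?_⟩
    intro e' he' x hx
    rcases List.mem_cons.mp he' with he' | he'
    · subst he'
      obtain ⟨v1, hv1, hle1⟩ := hcov1 x hx
      obtain ⟨v2, hv2, hle2⟩ := foldl_altInner_mono n m tr t _ x.1 v1 hv1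
      exact ⟨v2, hv2, le_trans hle2 hle1⟩
    · exact hcov2 e' he' x hx

-- a smaller b-trace dominates: every successor of (a, b) has a successor of (a, b'') at the
-- same key with value at most as large
theorem pvContrib_mono (n m : Int) (tr : Int × Int) (p : Int × Int) (b'' : Int) (hle : b'' ≤ p.2)
    (x : Int × Int) (hx : x ∈ pvContrib n m tr p) :
    ∃ y ∈ pvContrib n m tr (p.1, b''), y.1 = x.1 ∧ y.2 ≤ x.2 := by
  simp only [pvContrib, List.mem_append] at hx
  rcases hx with hx | hx
  · by_cases h1 : p.1 + tr.1 < n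
    · simp only [h1, if_true, List.mem_singleton] at hx
      subst hx
      exact ⟨(p.1 + tr.1, b''), by simp [pvContrib, h1], rfl, hle⟩
    · simp [h1] at hx
  · by_cases h2 : p.2 + tr.2 < m
    · simp only [h2, if_true, List.mem_singleton] at hx
      subst hx
      have h2' : b'' + tr.2 < m := by omega
      exact ⟨(p.1, b'' + tr.2), by simp [pvContrib, h2'], rfl, by omega⟩
    · simp [h2] at hx

-- the invariant carried by B's outer loop
def BInv (d : PySem.Dict Int Int) (S : List (Int × Int)) : Prop :=
  d.keys.Nodup ∧ (∀ a b, d.get? a = some b → (a, b) ∈ S) ∧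
  (∀ x ∈ S, ∃ b', d.get? x.1 = some b' ∧ b' ≤ x.2)

theorem b_step (n m : Int) (tr : Int × Int) (d : PySem.Dict Int Int) (S : List (Int × Int))
    (h : BInv d S) : BInv (altStep n m d tr) (pvStep n m tr S) := by
  obtain ⟨hn, hs, hc⟩ := h
  have hsub : ∀ e ∈ d.items, e ∈ S := by
    intro e he
    exact hs e.1 e.2 (PySem.Dict.get?_of_mem_items d he hn)
  obtain ⟨hn', hs', hcov⟩ := b_inner n m tr S d.items PySem.Dict.empty hsub
    PySem.Dict.nodup_keys_empty (by intro a b h; simp [PySem.Dict.get?_empty] at h)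
  refine ⟨hn', hs', ?_⟩
  intro x hx
  obtain ⟨p, hpS, hpc⟩ := (mem_pvStep n m tr S x).mp hx
  obtain ⟨b'', hb'', hble⟩ := hc p hpS
  obtain ⟨y, hy, hy1, hy2⟩ := pvContrib_mono n m tr p b'' hble x hpc
  have hmem : (p.1, b'') ∈ d.items := PySem.Dict.mem_items_of_get?_eq_some d hb''
  obtain ⟨v', hv', hvle⟩ := hcov (p.1, b'') hmem y hy
  exact ⟨v', by rwa [hy1] at hv', le_trans hvle hy2⟩

theorem b_outer (n m : Int) (info : List (Int × Int)) :
    ∀ (d : PySem.Dict Int Int) (S : List (Int × Int)), BInv d S →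
    BInv (info.foldl (altStep n m) d) (pvReach n m info S) := by
  induction info with
  | nil => intro d S h; simpa [pvReach] using h
  | cons tr t ih =>
    intro d S h
    simp only [List.foldl_cons]
    exact ih _ _ (b_step n m tr d S h)

-- keys of a dict satisfying BInv are exactly the a-coordinates of S
theorem BInv_keys (d : PySem.Dict Int Int) (S : List (Int × Int)) (h : BInv d S) :
    ∀ v, v ∈ d.keys ↔ ∃ x ∈ S, v = x.1 := by
  obtain ⟨_, hs, hc⟩ := h
  intro v
  constructor
  · intro hv
    cases hg : d.get? v with
    | none => exact absurd hv ((PySem.Dict.get?_eq_none_iff_not_mem_keys d v).mp hg)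
    | some b => exact ⟨(v, b), hs v b hg, rfl⟩
  · rintro ⟨x, hx, rfl⟩
    obtain ⟨b', hb', _⟩ := hc x hx
    have := PySem.Dict.mem_items_of_get?_eq_some d hb'
    exact PySem.Dict.mem_keys_of_mem_items (p := (x.1, b')) d this

-- ---------- A-side lemmas ----------

-- one conditional insert of A's inner loop, where the inserted value is the key's a-coordinate
theorem a_addOne (i u v : Int) (nd : PySem.Dict (Int × Int × Int) Int) (T : List (Int × Int))
    (hn : nd.keys.Nodup)
    (hk : ∀ k w, nd.get? k = some w → k.1 = i + 1)
    (hc : ∀ x : Int × Int, nd.get? (i + 1, x.1, x.2) = if x ∈ T then some x.1 else none) :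
    let nd' := match nd.get? (i + 1, u, v) with
               | none => nd.insert (i + 1, u, v) u
               | some old => nd.insert (i + 1, u, v) (min old u)
    nd'.keys.Nodup ∧ (∀ k w, nd'.get? k = some w → k.1 = i + 1) ∧
    (∀ x : Int × Int, nd'.get? (i + 1, x.1, x.2) = if x ∈ T ++ [(u, v)] then some x.1 else none) := by
  have hins : (match nd.get? (i + 1, u, v) with
               | none => nd.insert (i + 1, u, v) u
               | some old => nd.insert (i + 1, u, v) (min old u)) = nd.insert (i + 1, u, v) u := by
    cases hg : nd.get? (i + 1, u, v) with
    | none => rfl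
    | some old =>
      have := hc (u, v)
      simp only [hg] at this
      by_cases hm : (u, v) ∈ T
      · simp [hm] at this
        simp [this, min_self]
      · simp [hm] at this
  refine ⟨?_, ?_, ?_⟩ <;> simp only [hins]
  · exact PySem.Dict.nodup_keys_insert _ _ _ hn
  · intro k w hkw
    rw [PySem.Dict.get?_insert] at hkw
    split at hkw
    · rename_i he; subst he; rfl
    · exact hk k w hkw
  · intro x
    rw [PySem.Dict.get?_insert]
    by_cases hx : x = (u, v)
    · subst hx
      simp
    · have hne : ((i + 1 : Int), x.1, x.2) ≠ ((i + 1 : Int), u, v) := by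
        intro hcontra
        apply hx
        have h1 : x.1 = u := congrArg (fun z => z.2.1) hcontra
        have h2 : x.2 = v := congrArg (fun z => z.2.2) hcontra
        exact Prod.ext h1 h2
      rw [if_neg hne, hc x]
      have : (x ∈ T ++ [(u, v)]) ↔ x ∈ T := by simp [hx]
      by_cases hm : x ∈ T <;> simp [hm, hx]

-- A's inner loop over the dict items builds exactly pvStep of the index-i entries
theorem a_inner (n m i : Int) (at_ bt : Int) (items : List ((Int × Int × Int) × Int)) :
    ∀ (nd : PySem.Dict (Int × Int × Int) Int) (T : List (Int × Int)),
    nd.keys.Nodup →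
    (∀ k w, nd.get? k = some w → k.1 = i + 1) →
    (∀ x : Int × Int, nd.get? (i + 1, x.1, x.2) = if x ∈ T then some x.1 else none) →
    let nd' := items.foldl (aInnerBody n m i at_ bt) nd
    nd'.keys.Nodup ∧ (∀ k w, nd'.get? k = some w → k.1 = i + 1) ∧
    (∀ x : Int × Int, nd'.get? (i + 1, x.1, x.2) =
      if x ∈ T ++ pvStep n m (at_, bt) (pvProj i items) then some x.1 else none) := by
  induction items with
  | nil =>
    intro nd T hn hk hc
    exact ⟨hn, hk, by simpa [pvProj, pvStep] using hc⟩
  | cons e t ih =>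
    intro nd T hn hk hc
    simp only [List.foldl_cons]
    by_cases he : e.1.1 = i
    · -- this entry belongs to the current generation
      have hbody : aInnerBody n m i at_ bt nd e =
          (let nd1 := if e.1.2.1 + at_ < n then
              match nd.get? (i + 1, e.1.2.1 + at_, e.1.2.2) with
              | none => nd.insert (i + 1, e.1.2.1 + at_, e.1.2.2) (e.1.2.1 + at_)
              | some old => nd.insert (i + 1, e.1.2.1 + at_, e.1.2.2) (min old (e.1.2.1 + at_))
            else nd
           if e.1.2.2 + bt < m then
              match nd1.get? (i + 1, e.1.2.1, e.1.2.2 + bt) with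
              | none => nd1.insert (i + 1, e.1.2.1, e.1.2.2 + bt) e.1.2.1
              | some old => nd1.insert (i + 1, e.1.2.1, e.1.2.2 + bt) (min old e.1.2.1)
           else nd1) := by
        simp [aInnerBody, he]
      rw [hbody]
      by_cases h1 : e.1.2.1 + at_ < n
      · obtain ⟨hn1, hk1, hc1⟩ := a_addOne i (e.1.2.1 + at_) e.1.2.2 nd T hn hk hc
        simp only [if_pos h1]
        by_cases h2 : e.1.2.2 + bt < m
        · obtain ⟨hn2, hk2, hc2⟩ := a_addOne i e.1.2.1 (e.1.2.2 + bt) _ _ hn1 hk1 hc1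
          simp only [if_pos h2]
          obtain ⟨hn3, hk3, hc3⟩ := ih _ _ hn2 hk2 hc2
          refine ⟨hn3, hk3, ?_⟩
          intro x
          rw [hc3 x]
          have : (T ++ [(e.1.2.1 + at_, e.1.2.2)]) ++ [(e.1.2.1, e.1.2.2 + bt)] ++
                 pvStep n m (at_, bt) (pvProj i t) =
                 T ++ pvStep n m (at_, bt) (pvProj i (e :: t)) := by
            simp [pvProj, pvStep, he, pvContrib, h1, h2]
          rw [this]
        · simp only [if_neg h2]
          obtain ⟨hn3, hk3, hc3⟩ := ih _ _ hn1 hk1 hc1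
          refine ⟨hn3, hk3, ?_⟩
          intro x
          rw [hc3 x]
          have : (T ++ [(e.1.2.1 + at_, e.1.2.2)]) ++ pvStep n m (at_, bt) (pvProj i t) =
                 T ++ pvStep n m (at_, bt) (pvProj i (e :: t)) := by
            simp [pvProj, pvStep, he, pvContrib, h1, h2]
          rw [this]
      · simp only [if_neg h1]
        by_cases h2 : e.1.2.2 + bt < m
        · obtain ⟨hn2, hk2, hc2⟩ := a_addOne i e.1.2.1 (e.1.2.2 + bt) nd T hn hk hc
          simp only [if_pos h2]
          obtain ⟨hn3, hk3, hc3⟩ := ih _ _ hn2 hk2 hc2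
          refine ⟨hn3, hk3, ?_⟩
          intro x
          rw [hc3 x]
          have : (T ++ [(e.1.2.1, e.1.2.2 + bt)]) ++ pvStep n m (at_, bt) (pvProj i t) =
                 T ++ pvStep n m (at_, bt) (pvProj i (e :: t)) := by
            simp [pvProj, pvStep, he, pvContrib, h1, h2]
          rw [this]
        · simp only [if_neg h2]
          obtain ⟨hn3, hk3, hc3⟩ := ih _ _ hn hk hc
          refine ⟨hn3, hk3, ?_⟩
          intro x
          rw [hc3 x]
          have : T ++ pvStep n m (at_, bt) (pvProj i t) =
                 T ++ pvStep n m (at_, bt) (pvProj i (e :: t)) := by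
            simp [pvProj, pvStep, he, pvContrib, h1, h2]
          rw [this]
    · -- skipped entry: idx ≠ i
      have hbody : aInnerBody n m i at_ bt nd e = nd := by simp [aInnerBody, he]
      rw [hbody]
      obtain ⟨hn3, hk3, hc3⟩ := ih nd T hn hk hc
      refine ⟨hn3, hk3, ?_⟩
      intro x
      rw [hc3 x]
      have : pvProj i (e :: t) = pvProj i t := by simp [pvProj, he]
      rw [this]

-- dict update: looking up a key not among the updated pairs sees the old dict
theorem upd_get?_of_not_mem (ps : List ((Int × Int × Int) × Int)) :
    ∀ (d : PySem.Dict (Int × Int × Int) Int) (k : Int × Int × Int),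
    k ∉ ps.map (·.1) → (d.update ps).get? k = d.get? k := by
  induction ps with
  | nil => intro d k _; rfl
  | cons q t ih =>
    intro d k hk
    simp only [List.map_cons, List.mem_cons, not_or] at hk
    show ((d.insert q.1 q.2).update t).get? k = d.get? k
    rw [ih _ _ hk.2, PySem.Dict.get?_insert, if_neg hk.1]

-- dict update: a pair among the (distinct-keyed) updated pairs wins
theorem upd_get?_of_mem (ps : List ((Int × Int × Int) × Int)) :
    ∀ (d : PySem.Dict (Int × Int × Int) Int) (k : Int × Int × Int) (v : Int),
    (ps.map (·.1)).Nodup → (k, v) ∈ ps → (d.update ps).get? k = some v := by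
  induction ps with
  | nil => intro d k v _ h; simp at h
  | cons q t ih =>
    intro d k v hnd hmem
    simp only [List.map_cons, List.nodup_cons] at hnd
    rcases List.mem_cons.mp hmem with he | ht
    · subst he
      show ((d.insert k v).update t).get? k = some v
      rw [upd_get?_of_not_mem t _ k (by simpa using hnd.1), PySem.Dict.get?_insert_self]
    · exact ih _ _ _ hnd.2 ht

-- the index-i entries of a dict satisfying the invariant project to exactly S
theorem proj_mem (i : Int) (dp : PySem.Dict (Int × Int × Int) Int) (S : List (Int × Int))
    (hn : dp.keys.Nodup)
    (hc : ∀ x : Int × Int, dp.get? (i, x.1, x.2) = if x ∈ S then some x.1 else none) :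
    ∀ x, x ∈ pvProj i dp.items ↔ x ∈ S := by
  intro x
  constructor
  · intro hx
    simp only [pvProj, List.mem_map, List.mem_filter, beq_iff_eq] at hx
    obtain ⟨e, ⟨hmem, hidx⟩, hxe⟩ := hx
    have hget : dp.get? e.1 = some e.2 := by
      have : (e.1, e.2) ∈ dp.items := hmem
      exact PySem.Dict.get?_of_mem_items dp this hn
    have hkey : e.1 = (i, x.1, x.2) := by
      rw [← hxe]; rw [← hidx]
    rw [hkey] at hget
    rw [hc x] at hget
    by_cases hm : x ∈ S
    · exact hm
    · simp [hm] at hget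
  · intro hx
    have hget : dp.get? (i, x.1, x.2) = some x.1 := by rw [hc x, if_pos hx]
    have hmem := PySem.Dict.mem_items_of_get?_eq_some dp hget
    simp only [pvProj, List.mem_map, List.mem_filter, beq_iff_eq]
    exact ⟨((i, x.1, x.2), x.1), ⟨hmem, rfl⟩, rfl⟩

-- A's outer loop invariant: nodup keys, index bound, and the current-generation characterisation
theorem a_outer (n m : Int) (info : List (Int × Int)) :
    ∀ (s : Int) (dp : PySem.Dict (Int × Int × Int) Int) (S : List (Int × Int)),
    dp.keys.Nodup →
    (∀ k w, dp.get? k = some w → k.1 ≤ s) →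
    (∀ x : Int × Int, dp.get? (s, x.1, x.2) = if x ∈ S then some x.1 else none) →
    let dp' := (PySem.List.enumerate info s).foldl (aOuterBody n m) dp
    dp'.keys.Nodup ∧ (∀ k w, dp'.get? k = some w → k.1 ≤ s + info.length) ∧
    (∀ x : Int × Int, dp'.get? (s + info.length, x.1, x.2) =
      if x ∈ pvReach n m info S then some x.1 else none) := by
  induction info with
  | nil =>
    intro s dp S hn hk hc
    refine ⟨hn, ?_, ?_⟩ <;> simp only [PySem.List.enumerate_nil, List.foldl_nil,
      List.length_nil, Nat.cast_zero, add_zero]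
    · exact hk
    · simpa [pvReach] using hc
  | cons tr t ih =>
    intro s dp S hn hk hc
    rw [PySem.List.enumerate_cons]
    simp only [List.foldl_cons]
    set nd := dp.items.foldl (aInnerBody n m s tr.1 tr.2) PySem.Dict.empty with hnd
    have hstep : aOuterBody n m dp (s, tr) = dp.update nd.items := by
      simp [aOuterBody, hnd]
    obtain ⟨hn1, hk1, hc1⟩ := a_inner n m s tr.1 tr.2 dp.items PySem.Dict.empty []
      PySem.Dict.nodup_keys_empty (by intro k w h; simp [PySem.Dict.get?_empty] at h)
      (by intro x; simp [PySem.Dict.get?_empty])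
    simp only [List.nil_append] at hc1
    have hproj := proj_mem s dp S hn hc
    have hc1' : ∀ x : Int × Int, nd.get? (s + 1, x.1, x.2) =
        if x ∈ pvStep n m tr S then some x.1 else none := by
      intro x
      rw [hc1 x]
      have hiff := pvStep_congr n m tr (pvProj s dp.items) S hproj x
      by_cases hm : x ∈ pvStep n m tr S
      · rw [if_pos (hiff.mpr hm), if_pos hm]
      · rw [if_neg (fun hx => hm (hiff.mp hx)), if_neg hm]
    have hndkeys : nd.items.map (·.1) = nd.keys := rfl
    have hupd_some : ∀ k w, nd.get? k = some w → (dp.update nd.items).get? k = some w := by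
      intro k w h
      exact upd_get?_of_mem nd.items dp k w (hndkeys ▸ hn1) (PySem.Dict.mem_items_of_get?_eq_some nd h)
    have hupd_none : ∀ k, nd.get? k = none → (dp.update nd.items).get? k = dp.get? k := by
      intro k h
      apply upd_get?_of_not_mem
      rw [hndkeys]
      exact (PySem.Dict.get?_eq_none_iff_not_mem_keys nd k).mp h
    have hn2 : (dp.update nd.items).keys.Nodup := PySem.Dict.nodup_keys_update dp nd.items hn
    have hk2 : ∀ k w, (dp.update nd.items).get? k = some w → k.1 ≤ s + 1 := by
      intro k w h
      cases hg : nd.get? k with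
      | some w' => exact le_of_eq (hk1 k w' hg)
      | none =>
        rw [hupd_none k hg] at h
        have := hk k w h
        omega
    have hc2 : ∀ x : Int × Int, (dp.update nd.items).get? (s + 1, x.1, x.2) =
        if x ∈ pvStep n m tr S then some x.1 else none := by
      intro x
      by_cases hm : x ∈ pvStep n m tr S
      · rw [if_pos hm]
        exact hupd_some _ _ (by rw [hc1' x, if_pos hm])
      · rw [if_neg hm]
        rw [hupd_none _ (by rw [hc1' x, if_neg hm])]
        cases hg : dp.get? (s + 1, x.1, x.2) with
        | none => rfl
        | some w => exact absurd (hk _ _ hg) (by simp)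
    obtain ⟨hn3, hk3, hc3⟩ := ih (s + 1) (dp.update nd.items) (pvStep n m tr S) hn2 hk2 hc2
    rw [hstep]
    have hlen : s + 1 + (t.length : Int) = s + ((tr :: t).length : Int) := by
      simp [List.length_cons]; ring
    refine ⟨hn3, ?_, ?_⟩
    · intro k w h
      have := hk3 k w h
      omega
    · intro x
      rw [← hlen]
      rw [hc3 x]
      rfl

-- the values A filters at the final index are exactly the a-coordinates of the reached states
theorem vals_mem (L : Int) (dp : PySem.Dict (Int × Int × Int) Int) (R : List (Int × Int))
    (hn : dp.keys.Nodup)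
    (hc : ∀ x : Int × Int, dp.get? (L, x.1, x.2) = if x ∈ R then some x.1 else none) :
    ∀ v, v ∈ (dp.items.filter (fun e => e.1.1 == L)).map (fun e => e.2) ↔
         ∃ x ∈ R, v = x.1 := by
  intro v
  constructor
  · intro hv
    simp only [List.mem_map, List.mem_filter, beq_iff_eq] at hv
    obtain ⟨e, ⟨hmem, hidx⟩, hve⟩ := hv
    have hget : dp.get? e.1 = some e.2 := PySem.Dict.get?_of_mem_items dp hmem hn
    have hkey : e.1 = (L, e.1.2.1, e.1.2.2) := by
      rw [← hidx]
    rw [hkey] at hget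
    rw [hc (e.1.2.1, e.1.2.2)] at hget
    by_cases hm : (e.1.2.1, e.1.2.2) ∈ R
    · rw [if_pos hm] at hget
      exact ⟨(e.1.2.1, e.1.2.2), hm, by simp at hget; omega⟩
    · simp [hm] at hget
  · rintro ⟨x, hx, rfl⟩
    have hget : dp.get? (L, x.1, x.2) = some x.1 := by rw [hc x, if_pos hx]
    have hmem := PySem.Dict.mem_items_of_get?_eq_some dp hget
    simp only [List.mem_map, List.mem_filter, beq_iff_eq]
    exact ⟨((L, x.1, x.2), x.1), ⟨hmem, rfl⟩, rfl⟩

-- ===== VERDICT (by name: the statement is the Claim_ definition above) =====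
theorem solution_spec : Claim_equal_solution := by
  unfold Claim_equal_solution
  intro info n m _hdom
  unfold Spec_solution solution solution_alt
  -- A side: run the outer invariant from the initial dict
  have hn0 : ((PySem.Dict.empty : PySem.Dict (Int × Int × Int) Int).insert (0, 0, 0) 0).keys.Nodup :=
    PySem.Dict.nodup_keys_insert _ _ _ PySem.Dict.nodup_keys_empty
  have hk0 : ∀ k w, ((PySem.Dict.empty : PySem.Dict (Int × Int × Int) Int).insert (0, 0, 0) 0).get? k = some w → k.1 ≤ 0 := by
    intro k w h
    rw [PySem.Dict.get?_insert] at h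
    split at h
    · rename_i he; subst he; exact le_refl 0
    · simp [PySem.Dict.get?_empty] at h
  have hc0 : ∀ x : Int × Int, ((PySem.Dict.empty : PySem.Dict (Int × Int × Int) Int).insert (0, 0, 0) 0).get? (0, x.1, x.2) =
      if x ∈ [((0 : Int), (0 : Int))] then some x.1 else none := by
    intro x
    rw [PySem.Dict.get?_insert]
    by_cases hx : x = ((0 : Int), (0 : Int))
    · subst hx; simp
    · have hne : ((0 : Int), x.1, x.2) ≠ ((0 : Int), (0 : Int), (0 : Int)) := by
        intro hcontra
        apply hx
        have h1 : x.1 = 0 := congrArg (fun z => z.2.1) hcontra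
        have h2 : x.2 = 0 := congrArg (fun z => z.2.2) hcontra
        exact Prod.ext h1 h2
      rw [if_neg hne]
      simp [PySem.Dict.get?_empty, hx]
  obtain ⟨hnF, hkF, hcF⟩ := a_outer n m info 0 _ _ hn0 hk0 hc0
  simp only [zero_add] at hcF
  -- B side: the dominance invariant holds at the end
  have hinv0 : BInv ((PySem.Dict.empty : PySem.Dict Int Int).insert 0 0) [((0 : Int), (0 : Int))] := by
    refine ⟨PySem.Dict.nodup_keys_insert _ _ _ PySem.Dict.nodup_keys_empty, ?_, ?_⟩
    · intro a b h
      rw [PySem.Dict.get?_insert] at h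
      split at h
      · rename_i he
        simp only [Option.some.injEq] at h
        subst he; subst h; simp
      · simp [PySem.Dict.get?_empty] at h
    · intro x hx
      simp only [List.mem_singleton] at hx
      subst hx
      exact ⟨0, PySem.Dict.get?_insert_self _ _ _, le_refl 0⟩
  have hinvF := b_outer n m info _ _ hinv0
  have hkeys := BInv_keys _ _ hinvF
  -- the two lists fed to min have the same members
  have hmm : ∀ v, v ∈ (((PySem.List.enumerate info).foldl (aOuterBody n m)
        ((PySem.Dict.empty).insert (0, 0, 0) 0)).items.filter
        (fun e => e.1.1 == (info.length : Int))).map (fun e => e.2) ↔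
      v ∈ (info.foldl (altStep n m) ((PySem.Dict.empty).insert 0 0)).keys := by
    intro v
    rw [vals_mem (info.length : Int) _ (pvReach n m info [((0 : Int), (0 : Int))]) hnF hcF v,
      hkeys v]
  show (match PySem.List.min? ((((PySem.List.enumerate info).foldl (aOuterBody n m)
        ((PySem.Dict.empty).insert (0, 0, 0) 0)).items.filter
        (fun e => e.1.1 == (info.length : Int))).map (fun e => e.2)) (fun v => v) with
      | none => -1
      | some v => v) =
    (match PySem.List.min? ((info.foldl (altStep n m) ((PySem.Dict.empty).insert 0 0)).keys) (fun v => v) with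
      | none => -1
      | some v => v)
  rw [min?_congr_mem _ _ hmm]
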